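-- pv_equiv track=rewrite | github.com/Artemiadze/Programming-on-Python | main.py | replacing
-- ===== SOURCE A (Python) =====
-- def replacing(my_password, replace_symbols_on_numbers):
--     """ Если пользователю надо, то функция заменяет определённые буквы на цифры """
--     if replace_symbols_on_numbers == 'Н':
--         return my_password
--
--     #  Словарь букв, которые надо заменить на цифры
--     symbols_replacing = {
--         'i': '1', 'f': '4', 'o': '0', 'e': '2', 'k': '9',
--         'D': '7', 'S': '8', 'B': '5', 'T': '6', 'N': '3'
--     }
--     # Замена всех нужных букв на цифры с помощью итератора
--     for element in my_password:
--         if element in symbols_replacing: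
--             my_password = my_password.replace(element, symbols_replacing[element])
--     return my_password
-- ===== SOURCE B (Python) =====
-- def replacing(my_password, replace_symbols_on_numbers):
--     """ Если пользователю надо, то функция заменяет определённые буквы на цифры """
--     if replace_symbols_on_numbers == 'Н':
--         return my_password
--     symbols_replacing = {
--         'i': '1', 'f': '4', 'o': '0', 'e': '2', 'k': '9',
--         'D': '7', 'S': '8', 'B': '5', 'T': '6', 'N': '3'
--     }
--     # One linear pass: map each character through the table once.
--     return ''.join(symbols_replacing.get(c, c) for c in my_password)
-- ===== Notes on version B (the rewrite author's own statement) =====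
-- stated objective: faster
-- what changed: Replaces the per-character loop that calls str.replace (a full rescan-and-rebuild of the string for every table letter found) with a single linear pass joining table.get(c, c) for each character.
import Mathlib
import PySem

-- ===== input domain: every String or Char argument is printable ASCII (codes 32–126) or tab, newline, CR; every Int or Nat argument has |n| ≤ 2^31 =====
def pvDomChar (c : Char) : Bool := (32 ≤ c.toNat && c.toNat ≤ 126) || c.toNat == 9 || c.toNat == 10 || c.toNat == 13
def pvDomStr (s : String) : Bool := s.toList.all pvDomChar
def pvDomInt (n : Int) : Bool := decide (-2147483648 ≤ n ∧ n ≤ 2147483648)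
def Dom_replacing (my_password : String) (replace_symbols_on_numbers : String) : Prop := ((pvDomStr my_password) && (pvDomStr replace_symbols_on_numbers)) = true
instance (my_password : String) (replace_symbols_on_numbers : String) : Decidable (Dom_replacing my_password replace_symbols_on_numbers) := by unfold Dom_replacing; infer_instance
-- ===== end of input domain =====

-- B replaces A's per-letter str.replace rescans with one linear pass mapping each character through the table (faster).


-- The substitution dict, shared verbatim by both Python versions
def pvTable : PySem.Dict Char Char :=
  ⟨[('i','1'), ('f','4'), ('o','0'), ('e','2'), ('k','9'),
    ('D','7'), ('S','8'), ('B','5'), ('T','6'), ('N','3')]⟩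

-- ===== PORT A =====
-- loop over the ORIGINAL string's characters, state = the evolving string
def replacing (my_password : String) (replace_symbols_on_numbers : String) : String :=
  if replace_symbols_on_numbers = "Н" then my_password
  else
    my_password.toList.foldl
      (fun acc element =>
        match PySem.Dict.get? pvTable element with
        | some d => PySem.Str.replace acc (String.ofList [element]) (String.ofList [d])
        | none => acc)
      my_password

-- ===== PORT B =====
-- ''.join(symbols_replacing.get(c, c) for c in my_password): one pass, one lookup per character
def replacing_alt (my_password : String) (replace_symbols_on_numbers : String) : String :=
  if replace_symbols_on_numbers = "Н" then my_password
  else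
    PySem.Str.join "" (my_password.toList.map
      (fun c => String.ofList [PySem.Dict.getD pvTable c c]))

-- ===== PRECONDITION & SPEC =====
def Spec_replacing (my_password : String) (replace_symbols_on_numbers : String) (out : String) : Prop := out = replacing_alt my_password replace_symbols_on_numbers
instance (my_password : String) (replace_symbols_on_numbers : String) (out : String) : Decidable (Spec_replacing my_password replace_symbols_on_numbers out) := by unfold Spec_replacing; infer_instance

-- ===== CLAIM (what is proved, stated in full; the proofs are below) =====
def Claim_equal_replacing : Prop := ∀ (my_password : String) (replace_symbols_on_numbers : String), Dom_replacing my_password replace_symbols_on_numbers → Spec_replacing my_password replace_symbols_on_numbers (replacing my_password replace_symbols_on_numbers)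

-- ===== LEMMAS AND PROOFS =====

-- the per-character substitution both programs effect
def pvSub (c : Char) : Char := PySem.Dict.getD pvTable c c

def pvIsKey (c : Char) : Bool := (PySem.Dict.get? pvTable c).isSome

theorem pvSub_of_not_key {c : Char} (h : pvIsKey c = false) : pvSub c = c := by
  simp only [pvIsKey, Option.isSome_eq_false_iff, Option.isNone_iff_eq_none] at h
  simp [pvSub, PySem.Dict.getD, h]

theorem pvSub_of_get {c d : Char} (h : PySem.Dict.get? pvTable c = some d) : pvSub c = d := by
  simp [pvSub, PySem.Dict.getD, h]

-- table values are never keys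
theorem pvVal_not_key {c d : Char} (h : PySem.Dict.get? pvTable c = some d) :
    pvIsKey d = false := by
  simp only [PySem.Dict.get?, Option.map_eq_some_iff] at h
  obtain ⟨p, hp, rfl⟩ := h
  have hm := List.mem_of_find?_eq_some hp
  fin_cases hm <;> decide

-- Chars.replace with a single-character pattern is a map
theorem replace_go_singleton (a b : Char) :
    ∀ (l : List Char) (fuel : Nat) (acc : List Char), l.length ≤ fuel →
    PySem.Chars.replace.go [a] [b] fuel l acc =
      acc.reverse ++ l.map (fun c => if c = a then b else c) := by
  intro l
  induction l with
  | nil => intro fuel acc _; cases fuel <;> simp [PySem.Chars.replace.go]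
  | cons c t ih =>
    intro fuel acc hf
    cases fuel with
    | zero => simp at hf
    | succ n =>
      rw [PySem.Chars.replace.go]
      simp only [List.length_cons] at hf
      by_cases hc : a = c
      · rw [if_pos (by simp [List.isPrefixOf, hc])]
        rw [show List.drop [a].length (c :: t) = t from by simp]
        rw [ih n _ (by omega)]
        subst hc
        simp
      · rw [if_neg (by simp [List.isPrefixOf]; exact hc)]
        rw [ih n _ (by omega)]
        simp [show (if c = a then b else c) = c from if_neg (fun h => hc h.symm)]

theorem replace_singleton (s : List Char) (a b : Char) :
    PySem.Chars.replace s [a] [b] = s.map (fun c => if c = a then b else c) := by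
  rw [PySem.Chars.replace]
  simp only [List.isEmpty_cons, Bool.false_eq_true, if_false]
  exact replace_go_singleton a b s s.length [] le_rfl

-- the list-level form of A's loop body
def pvStepL (s : List Char) (e : Char) : List Char :=
  match PySem.Dict.get? pvTable e with
  | some d => PySem.Chars.replace s [e] [d]
  | none => s

theorem foldl_toList (l : List Char) :
    ∀ (s : String),
    (l.foldl (fun acc element =>
        match PySem.Dict.get? pvTable element with
        | some d => PySem.Str.replace acc (String.ofList [element]) (String.ofList [d])
        | none => acc) s).toList
      = l.foldl pvStepL s.toList := by
  induction l with
  | nil => intro s; rfl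
  | cons e t ih =>
    intro s
    rw [List.foldl_cons, List.foldl_cons, ih]
    congr 1
    cases h : PySem.Dict.get? pvTable e with
    | none => simp [pvStepL, h]
    | some d => simp [pvStepL, h, PySem.Str.toList_replace, String.toList_ofList]

-- loop invariant: once every key character of s still occurs in the remaining
-- iteration list l, the loop rewrites s exactly as the per-character map pvSub
theorem loop_eq_map :
    ∀ (l s : List Char), (∀ c ∈ s, pvIsKey c = true → c ∈ l) →
    l.foldl pvStepL s = s.map pvSub := by
  intro l
  induction l with
  | nil =>
    intro s hs
    simp only [List.foldl_nil]
    conv_lhs => rw [← List.map_id s]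
    apply List.map_congr_left
    intro c hc
    rcases hk : pvIsKey c with _ | _
    · exact (pvSub_of_not_key hk).symm
    · exact absurd (hs c hc hk) (List.not_mem_nil)
  | cons e t ih =>
    intro s hs
    rw [List.foldl_cons]
    cases h : PySem.Dict.get? pvTable e with
    | none =>
      have he : pvIsKey e = false := by simp [pvIsKey, h]
      rw [show pvStepL s e = s by simp [pvStepL, h]]
      apply ih
      intro c hc hk
      rcases List.mem_cons.mp (hs c hc hk) with h' | h'
      · rw [h'] at hk; simp [he] at hk
      · exact h'
    | some d =>
      rw [show pvStepL s e = s.map (fun c => if c = e then d else c) by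
            simp [pvStepL, h, replace_singleton]]
      rw [ih]
      · rw [List.map_map]
        apply List.map_congr_left
        intro c _
        by_cases hc : c = e
        · subst hc
          simp [Function.comp, pvSub_of_not_key (pvVal_not_key h), pvSub_of_get h]
        · simp [Function.comp, hc]
      · intro c hc hk
        simp only [List.mem_map] at hc
        obtain ⟨c0, hc0, hceq⟩ := hc
        by_cases h0 : c0 = e
        · exfalso
          subst h0
          simp at hceq
          rw [← hceq] at hk
          exact absurd hk (by simp [pvVal_not_key h])
        · rw [if_neg h0] at hceq
          subst hceq
          rcases List.mem_cons.mp (hs c0 hc0 hk) with h' | h'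
          · exact absurd h' h0
          · exact h'

-- B's join of single-character strings is just the mapped character list
theorem flatten_intersperse_nil : ∀ (l : List (List Char)),
    (List.intersperse [] l).flatten = l.flatten
  | [] => rfl
  | [_] => by simp [List.intersperse]
  | x :: y :: t => by
      show (x :: [] :: List.intersperse [] (y :: t)).flatten = _
      simp [flatten_intersperse_nil (y :: t)]

theorem alt_toList (mp : String) :
    (PySem.Str.join "" (mp.toList.map (fun c => String.ofList [pvSub c]))).toList
      = mp.toList.map pvSub := by
  rw [PySem.Str.toList_join]
  show PySem.Chars.join [] _ = _
  rw [PySem.Chars.join, List.intercalate, flatten_intersperse_nil]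
  induction mp.toList with
  | nil => rfl
  | cons c t ih => simpa using ih

-- ===== VERDICT (by name: the statement is the Claim_ definition above) =====
theorem replacing_spec : Claim_equal_replacing := by
  intro mp rs _
  unfold Spec_replacing replacing replacing_alt
  by_cases hr : rs = "Н"
  · simp [hr]
  · rw [if_neg hr, if_neg hr]
    apply String.toList_injective
    rw [foldl_toList, loop_eq_map _ _ (fun c hc _ => hc)]
    exact (alt_toList mp).symm
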